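-- pv_equiv track=rewrite | github.com/AyushAgnihotri2025/CP-Solutions | GeeksforGeeks/Python3/Medium/Count ways to increase LCS length of two strings by one/count-ways-to-increase-lcs-length-of-two-strings-by-one.py | waysToIncreaseLCSBy
-- ===== SOURCE A (Python) =====
-- def waysToIncreaseLCSBy(N1,S1,N2,S2):
--     # code here
--     m = len(S1)
--     n = len(S2)
--
--     # Fill positions of each character in vector
--     # vector<int> position[M];
--     position = [[] for i in range(26)]
--     for i in range(1, n+1, 1):
--         position[ord(S2[i-1])-97].append(i)
--
--     # Initializing 2D array by 0 values
--     lcsl = [[0 for i in range(n+2)] for j in range(m+2)]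
--     lcsr = [[0 for i in range(n+2)] for j in range(m+2)]
--
--     # Filling LCS array for prefix substrings
--     for i in range(1, m+1, 1):
--         for j in range(1, n+1,1):
--             if (S1[i-1] == S2[j-1]):
--                 lcsl[i][j] = 1 + lcsl[i-1][j-1]
--             else:
--                 lcsl[i][j] = max(lcsl[i-1][j],
--                                 lcsl[i][j-1])
--
--     # Filling LCS array for suffix substrings
--     for i in range(m, 0, -1):
--         for j in range(n, 0, -1):
--             if (S1[i-1] == S2[j-1]):
--                 lcsr[i][j] = 1 + lcsr[i+1][j+1]
--             else:
--                 lcsr[i][j] = max(lcsr[i+1][j],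
--                                 lcsr[i][j+1])
--
--         # Looping for all possible insertion positions
--         # in first string
--     ways = 0
--     for i in range(0, m+1,1):
--         # Trying all possible lower case characters
--         for C in range(0, 26,1):
--             # Now for each character, loop over same
--             # character positions in second string
--             for j in range(0, len(position[C]),1):
--                 p = position[C][j]
--
--                 # If both, left and right substrings make
--                 # total LCS then increase result by 1
--                 if (lcsl[i][p-1] + lcsr[i+1][p+1] == lcsl[m][n]):
--                     ways += 1
--                     break
--     return ways
-- ===== SOURCE B (Python) =====
-- def waysToIncreaseLCSBy(N1, S1, N2, S2):
--     m, n = len(S1), len(S2)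
--
--     # Same two LCS table fills as the original (prefix table and suffix table)
--     lcsl = [[0] * (n + 2) for _ in range(m + 2)]
--     lcsr = [[0] * (n + 2) for _ in range(m + 2)]
--     for i in range(1, m + 1):
--         for j in range(1, n + 1):
--             if S1[i - 1] == S2[j - 1]:
--                 lcsl[i][j] = 1 + lcsl[i - 1][j - 1]
--             else:
--                 lcsl[i][j] = max(lcsl[i - 1][j], lcsl[i][j - 1])
--     for i in range(m, 0, -1):
--         for j in range(n, 0, -1):
--             if S1[i - 1] == S2[j - 1]:
--                 lcsr[i][j] = 1 + lcsr[i + 1][j + 1]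
--             else:
--                 lcsr[i][j] = max(lcsr[i + 1][j], lcsr[i][j + 1])
--
--     total = lcsl[m][n]
--     # Transposed counting: positions of S2 outer, insertion gaps inner.
--     # Each gap keeps an integer bitmask of the characters that work there;
--     # OR is idempotent, so duplicate characters cost nothing and need no
--     # bookkeeping.  A final staged pass sums the popcounts.
--     masks = [0] * (m + 1)
--     for p in range(1, n + 1):
--         bit = 2 ** ord(S2[p - 1])
--         for i in range(m + 1):
--             if lcsl[i][p - 1] + lcsr[i + 1][p + 1] == total:
--                 masks[i] |= bit
--     ways = 0
--     for mask in masks: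
--         ways += bin(mask).count('1')
--     return ways
-- ===== Notes on version B (the rewrite author's own statement) =====
-- stated objective: alternative
-- what changed: The whole counting phase is rebuilt: instead of A's gap-major triple loop over 26 precomputed per-character position buckets with an early break, B transposes the loop nest (S2 positions outer, insertion gaps inner), accumulates for each gap an integer bitmask of usable characters with OR (idempotence replaces all distinctness bookkeeping), and sums popcounts in a separate final pass.
-- outside the precondition, e.g. on waysToIncreaseLCSBy(0, '', 2, 'Ga'): A returns 1, B returns 2; on waysToIncreaseLCSBy(1, 'a', 1, ' '): A raises IndexError, B returns 2
import Mathlib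
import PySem

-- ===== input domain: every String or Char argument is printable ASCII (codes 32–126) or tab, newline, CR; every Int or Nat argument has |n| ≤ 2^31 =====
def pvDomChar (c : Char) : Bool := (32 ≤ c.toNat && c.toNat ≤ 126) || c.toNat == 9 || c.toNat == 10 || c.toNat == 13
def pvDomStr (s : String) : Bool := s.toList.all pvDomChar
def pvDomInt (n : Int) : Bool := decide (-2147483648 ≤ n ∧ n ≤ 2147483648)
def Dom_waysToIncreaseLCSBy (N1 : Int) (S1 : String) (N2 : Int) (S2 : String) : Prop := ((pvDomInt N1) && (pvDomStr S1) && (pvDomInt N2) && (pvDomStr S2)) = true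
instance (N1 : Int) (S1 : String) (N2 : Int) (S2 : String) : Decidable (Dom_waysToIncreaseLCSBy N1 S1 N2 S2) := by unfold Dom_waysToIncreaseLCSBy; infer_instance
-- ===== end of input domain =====

set_option maxRecDepth 40000


-- B rebuilds A's counting phase: the loop nest is transposed (S2 positions outer,
-- insertion gaps inner), each gap accumulates an integer bitmask of usable characters
-- with OR (idempotence replaces all distinctness bookkeeping — no buckets, no break),
-- and a final staged pass sums popcounts; objective: alternative (same O(m*n) cost).

-- ===== PORT A =====
-- shared 2D-table helpers (both Pythons contain the identical two LCS table fills)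
def pvGet2 (t : List (List Int)) (i j : Int) : Int :=
  PySem.List.pyGetD (PySem.List.pyGetD t i []) j 0

def pvSet2 (t : List (List Int)) (i j : Int) (v : Int) : List (List Int) :=
  PySem.List.pySetD t i (PySem.List.pySetD (PySem.List.pyGetD t i []) j v)

-- 'lcsl' fill: for i in range(1,m+1): for j in range(1,n+1): …
def pvFillL (cs1 cs2 : List Char) : List (List Int) :=
  let m : Int := cs1.length
  let n : Int := cs2.length
  (PySem.List.pyRange 1 (m+1) 1).foldl (fun t i =>
    (PySem.List.pyRange 1 (n+1) 1).foldl (fun t j =>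
      if PySem.List.pyGetD cs1 (i-1) ' ' == PySem.List.pyGetD cs2 (j-1) ' '
      then pvSet2 t i j (1 + pvGet2 t (i-1) (j-1))
      else pvSet2 t i j (max (pvGet2 t (i-1) j) (pvGet2 t i (j-1)))) t)
    (List.replicate (cs1.length+2) (List.replicate (cs2.length+2) (0:Int)))

-- 'lcsr' fill: for i in range(m,0,-1): for j in range(n,0,-1): …
def pvFillR (cs1 cs2 : List Char) : List (List Int) :=
  let m : Int := cs1.length
  let n : Int := cs2.length
  (PySem.List.pyRange m 0 (-1)).foldl (fun t i =>
    (PySem.List.pyRange n 0 (-1)).foldl (fun t j =>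
      if PySem.List.pyGetD cs1 (i-1) ' ' == PySem.List.pyGetD cs2 (j-1) ' '
      then pvSet2 t i j (1 + pvGet2 t (i+1) (j+1))
      else pvSet2 t i j (max (pvGet2 t (i+1) j) (pvGet2 t i (j+1)))) t)
    (List.replicate (cs1.length+2) (List.replicate (cs2.length+2) (0:Int)))

-- A's innermost 'for j in …: if …: ways += 1; break' as structural recursion over the bucket
def pvInnerA (lcsl lcsr : List (List Int)) (m n i : Int) : List Int → Int → Int
  | [], ways => ways
  | p :: rest, ways =>
      if pvGet2 lcsl i (p-1) + pvGet2 lcsr (i+1) (p+1) == pvGet2 lcsl m n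
      then ways + 1
      else pvInnerA lcsl lcsr m n i rest ways

def waysToIncreaseLCSBy (N1 : Int) (S1 : String) (N2 : Int) (S2 : String) : Int :=
  let cs1 := S1.toList
  let cs2 := S2.toList
  let m : Int := cs1.length
  let n : Int := cs2.length
  -- position[ord(S2[i-1])-97].append(i): pySetD/pyGetD give Python's (possibly negative)
  -- indexing; out-of-range (A's IndexError) is excluded by Pre_
  let position : List (List Int) :=
    (PySem.List.pyRange 1 (n+1) 1).foldl (fun pos i =>
      let c := PySem.List.pyGetD cs2 (i-1) ' '
      PySem.List.pySetD pos ((c.toNat : Int) - 97)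
        (PySem.List.pyGetD pos ((c.toNat : Int) - 97) [] ++ [i]))
      (List.replicate 26 ([] : List Int))
  let lcsl := pvFillL cs1 cs2
  let lcsr := pvFillR cs1 cs2
  (PySem.List.pyRange 0 (m+1) 1).foldl (fun ways i =>
    (PySem.List.pyRange 0 26 1).foldl (fun ways C =>
      pvInnerA lcsl lcsr m n i (PySem.List.pyGetD position C []) ways) ways) 0

-- ===== PORT B =====
-- bin(x).count('1') of Source B, ported by hand: binary recursion on x.toNat; exact for
-- nonnegative x (every mask Source B feeds it is built from 0 by OR-ing powers of two)
def pvPopN (n : Nat) : Nat :=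
  if h : n = 0 then 0 else n % 2 + pvPopN (n / 2)
termination_by n
decreasing_by exact Nat.div_lt_self (Nat.pos_of_ne_zero h) (by omega)

def pvPopcount (x : Int) : Int := (pvPopN x.toNat : Int)

def waysToIncreaseLCSBy_alt (N1 : Int) (S1 : String) (N2 : Int) (S2 : String) : Int :=
  let cs1 := S1.toList
  let cs2 := S2.toList
  let m : Int := cs1.length
  let n : Int := cs2.length
  let lcsl := pvFillL cs1 cs2
  let lcsr := pvFillR cs1 cs2
  let total := pvGet2 lcsl m n
  -- masks[i] |= 2 ** ord(S2[p-1]); Python's '|' on (here nonnegative) ints is Int.lor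
  let masks : List Int :=
    (PySem.List.pyRange 1 (n+1) 1).foldl (fun masks p =>
      let bit : Int := 2 ^ (PySem.List.pyGetD cs2 (p-1) ' ').toNat
      (PySem.List.pyRange 0 (m+1) 1).foldl (fun masks i =>
        if pvGet2 lcsl i (p-1) + pvGet2 lcsr (i+1) (p+1) == total
        then PySem.List.pySetD masks i (Int.lor (PySem.List.pyGetD masks i 0) bit)
        else masks) masks)
      (List.replicate (cs1.length + 1) (0:Int))
  masks.foldl (fun ways mask => ways + pvPopcount mask) 0

-- ===== PRECONDITION & SPEC =====
-- Pre_ excludes (a) inputs whose S2 has a character with code outside [71,122], on which A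
-- raises IndexError at position[ord(c)-97], and (b) inputs whose S2 contains both a character
-- c in 'G'..'`' and the character c+26: there Python's negative-index wraparound merges the two
-- distinct characters into one position bucket, so the count A returns reflects that accidental
-- aliasing and a per-character implementation cannot match it.
def Pre_waysToIncreaseLCSBy (N1 : Int) (S1 : String) (N2 : Int) (S2 : String) : Prop :=
  ((S2.toList.all fun c => 71 ≤ c.toNat && c.toNat ≤ 122)
    && (S2.toList.all fun c =>
        !(71 ≤ c.toNat && c.toNat ≤ 96 && S2.toList.contains (Char.ofNat (c.toNat + 26))))) = true
instance (N1 : Int) (S1 : String) (N2 : Int) (S2 : String) : Decidable (Pre_waysToIncreaseLCSBy N1 S1 N2 S2) := by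
  unfold Pre_waysToIncreaseLCSBy; infer_instance

def pvWitness_waysToIncreaseLCSBy : Int × String × Int × String := (3, "abc", 3, "cab")

def Spec_waysToIncreaseLCSBy (N1 : Int) (S1 : String) (N2 : Int) (S2 : String) (out : Int) : Prop :=
  out = waysToIncreaseLCSBy_alt N1 S1 N2 S2
instance (N1 : Int) (S1 : String) (N2 : Int) (S2 : String) (out : Int) : Decidable (Spec_waysToIncreaseLCSBy N1 S1 N2 S2 out) := by
  unfold Spec_waysToIncreaseLCSBy; infer_instance

-- ===== CLAIM (what is proved, stated in full; the proofs are below) =====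
def Claim_equal_waysToIncreaseLCSBy : Prop := ∀ (N1 : Int) (S1 : String) (N2 : Int) (S2 : String), Dom_waysToIncreaseLCSBy N1 S1 N2 S2 → Pre_waysToIncreaseLCSBy N1 S1 N2 S2 → Spec_waysToIncreaseLCSBy N1 S1 N2 S2 (waysToIncreaseLCSBy N1 S1 N2 S2)

-- ===== LEMMAS AND PROOFS =====

-- bucket actually hit by Python's position[ord(c)-97] (negative indices wrap)
def pvBkt (c : Char) : Nat := if c.toNat < 97 then c.toNat - 71 else c.toNat - 97

def pvCh (cs2 : List Char) (p : Int) : Char := PySem.List.pyGetD cs2 (p-1) ' '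

def pvCond (lcsl lcsr : List (List Int)) (m n i : Int) (p : Int) : Bool :=
  pvGet2 lcsl i (p-1) + pvGet2 lcsr (i+1) (p+1) == pvGet2 lcsl m n

-- characters of S2 that have a position satisfying the condition, with multiplicity/order
def pvSat (cond : Int → Bool) (cs2 : List Char) (L : List Int) : List Char :=
  (L.filter cond).map (pvCh cs2)

lemma pvIdx_get (acc : List (List Int)) (hl : acc.length = 26) {c : Char}
    (h1 : 71 ≤ c.toNat) (h2 : c.toNat ≤ 122) :
    PySem.List.pyGetD acc ((c.toNat : Int) - 97) [] = acc.getD (pvBkt c) [] := by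
  simp only [PySem.List.pyGetD, PySem.List.pyGet?, PySem.List.pyIdx?, hl, pvBkt]
  by_cases h : c.toNat < 97
  · rw [if_neg (by omega), if_pos (by omega), if_pos h]
    have h3 : (-((c.toNat : Int) - 97)).toNat = 97 - c.toNat := by omega
    rw [h3]
    have h4 : 26 - (97 - c.toNat) = c.toNat - 71 := by omega
    rw [h4, Option.bind_some, List.getD_eq_getElem?_getD]
  · rw [if_pos (by omega), if_pos (by push_cast; omega), if_neg h]
    have h3 : ((c.toNat : Int) - 97).toNat = c.toNat - 97 := by omega
    rw [h3, Option.bind_some, List.getD_eq_getElem?_getD]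

lemma pvIdx_set (acc : List (List Int)) (hl : acc.length = 26) {c : Char}
    (h1 : 71 ≤ c.toNat) (h2 : c.toNat ≤ 122) (v : List Int) :
    PySem.List.pySetD acc ((c.toNat : Int) - 97) v = acc.set (pvBkt c) v := by
  simp only [PySem.List.pySetD, PySem.List.pySet?, PySem.List.pyIdx?, hl, pvBkt]
  by_cases h : c.toNat < 97
  · rw [if_neg (by omega), if_pos (by omega), if_pos h]
    have h3 : (-((c.toNat : Int) - 97)).toNat = 97 - c.toNat := by omega
    have h4 : 26 - (97 - c.toNat) = c.toNat - 71 := by omega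
    rw [h3, h4, Option.map_some, Option.getD_some]
  · rw [if_pos (by omega), if_pos (by push_cast; omega), if_neg h]
    have h3 : ((c.toNat : Int) - 97).toNat = c.toNat - 97 := by omega
    rw [h3, Option.map_some, Option.getD_some]

lemma pvInnerA_eq (lcsl lcsr : List (List Int)) (m n i : Int) (ps : List Int) (w : Int) :
    pvInnerA lcsl lcsr m n i ps w
      = w + (if ps.any (pvCond lcsl lcsr m n i) then 1 else 0) := by
  induction ps generalizing w with
  | nil => simp [pvInnerA]
  | cons p rest ih =>
    simp only [pvInnerA, List.any_cons, pvCond]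
    by_cases h : (pvGet2 lcsl i (p-1) + pvGet2 lcsr (i+1) (p+1) == pvGet2 lcsl m n) = true
    · simp [h]
    · simp only [Bool.not_eq_true] at h
      simp [h, ih, pvCond]

lemma pvPos_spec (cs2 : List Char) (hpre : ∀ c ∈ cs2, 71 ≤ c.toNat ∧ c.toNat ≤ 122)
    (L : List Int) :
    ∀ (acc : List (List Int)), acc.length = 26 →
    (∀ p ∈ L, PySem.Raise.InRange cs2.length (p-1)) →
    (L.foldl (fun pos i =>
        PySem.List.pySetD pos (((PySem.List.pyGetD cs2 (i-1) ' ').toNat : Int) - 97)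
          (PySem.List.pyGetD pos (((PySem.List.pyGetD cs2 (i-1) ' ').toNat : Int) - 97) [] ++ [i]))
      acc).length = 26 ∧
    ∀ b : Nat, b < 26 →
      ((L.foldl (fun pos i =>
          PySem.List.pySetD pos (((PySem.List.pyGetD cs2 (i-1) ' ').toNat : Int) - 97)
            (PySem.List.pyGetD pos (((PySem.List.pyGetD cs2 (i-1) ' ').toNat : Int) - 97) [] ++ [i]))
        acc).getD b [])
      = acc.getD b [] ++ L.filter (fun p => pvBkt (pvCh cs2 p) == b) := by
  induction L with
  | nil => intro acc hl _; simpa using hl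
  | cons p rest ih =>
    intro acc hl hin
    have hmem : PySem.List.pyGetD cs2 (p-1) ' ' ∈ cs2 :=
      PySem.List.pyGetD_mem cs2 ' ' (hin p (List.mem_cons_self ..))
    obtain ⟨h1, h2⟩ := hpre _ hmem
    simp only [List.foldl_cons]
    rw [pvIdx_get acc hl h1 h2, pvIdx_set acc hl h1 h2]
    set c := PySem.List.pyGetD cs2 (p-1) ' ' with hc
    set acc' := acc.set (pvBkt c) (acc.getD (pvBkt c) [] ++ [p]) with hacc'
    have hl' : acc'.length = 26 := by simp [hacc', hl]
    have hbk : pvBkt c < 26 := by unfold pvBkt; split <;> omega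
    obtain ⟨ihlen, ihspec⟩ := ih acc' hl' (fun q hq => hin q (List.mem_cons_of_mem _ hq))
    refine ⟨ihlen, fun b hb => ?_⟩
    rw [ihspec b hb]
    have hget : acc'.getD b [] = if pvBkt c = b then acc.getD b [] ++ [p] else acc.getD b [] := by
      rw [hacc', List.getD_eq_getElem?_getD, List.getElem?_set]
      split
      · next heq => simp [heq ▸ hbk, hl, heq, List.getD_eq_getElem?_getD]
      · rw [List.getD_eq_getElem?_getD]
    have hch : pvCh cs2 p = c := by rw [pvCh, hc]
    rw [hget]
    by_cases hbe : pvBkt c = b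
    · have hf : (pvBkt (pvCh cs2 p) == b) = true := by simp [hch, hbe]
      simp only [List.filter_cons, hf, if_pos hbe, if_true]
      simp [List.append_assoc]
    · have hf : (pvBkt (pvCh cs2 p) == b) = false := by simp [hch, hbe]
      simp only [List.filter_cons, hf, if_neg hbe, Bool.false_eq_true, if_false]

lemma pvChar_toNat_inj {a b : Char} (h : a.toNat = b.toNat) : a = b := by
  have := congrArg Char.ofNat h
  rwa [Char.ofNat_toNat, Char.ofNat_toNat] at this

lemma pvBkt_lt {c : Char} (h1 : 71 ≤ c.toNat) (h2 : c.toNat ≤ 122) : pvBkt c < 26 := by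
  unfold pvBkt; split <;> omega

lemma pvMem_of_mem_pyRange (cs2 : List Char) {p : Int}
    (hp : p ∈ PySem.List.pyRange 1 ((cs2.length : Int) + 1) 1) :
    pvCh cs2 p ∈ cs2 := by
  rw [PySem.List.mem_pyRange_one] at hp
  exact PySem.List.pyGetD_mem cs2 ' ' (by constructor <;> omega)

lemma pvCount_eq (cond : Int → Bool) (cs2 : List Char)
    (hpre : ∀ c ∈ cs2, 71 ≤ c.toNat ∧ c.toNat ≤ 122)
    (hnd : ∀ c ∈ cs2, 71 ≤ c.toNat → c.toNat ≤ 96 → Char.ofNat (c.toNat + 26) ∉ cs2) :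
    ((List.range 26).countP
        (fun b => ((PySem.List.pyRange 1 ((cs2.length : Int) + 1) 1).filter
            (fun p => pvBkt (pvCh cs2 p) == b)).any cond))
    = (pvSat cond cs2 (PySem.List.pyRange 1 ((cs2.length : Int) + 1) 1)).toFinset.card := by
  set L := PySem.List.pyRange 1 ((cs2.length : Int) + 1) 1 with hL
  set S := (pvSat cond cs2 L).toFinset with hS
  have hmemS : ∀ c ∈ S, c ∈ cs2 := by
    intro c hcS
    simp only [hS, List.mem_toFinset, pvSat, List.mem_map, List.mem_filter] at hcS
    obtain ⟨p, ⟨hpL, _⟩, rfl⟩ := hcS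
    exact pvMem_of_mem_pyRange cs2 hpL
  rw [List.countP_eq_length_filter]
  rw [← List.toFinset_card_of_nodup (List.Nodup.filter _ List.nodup_range)]
  have himg : ((List.range 26).filter
      (fun b => (L.filter (fun p => pvBkt (pvCh cs2 p) == b)).any cond)).toFinset
      = S.image pvBkt := by
    ext b
    simp only [List.mem_toFinset, List.mem_filter, List.mem_range, List.any_filter,
      List.any_eq_true, Bool.and_eq_true, beq_iff_eq, Finset.mem_image, hS, pvSat,
      List.mem_map]
    constructor
    · rintro ⟨hb26, p, hpL, hbk, hcond⟩
      exact ⟨pvCh cs2 p, ⟨p, ⟨hpL, hcond⟩, rfl⟩, hbk⟩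
    · rintro ⟨c, ⟨p, ⟨hpL, hcond⟩, rfl⟩, rfl⟩
      have hc2 := pvMem_of_mem_pyRange cs2 hpL
      obtain ⟨u1, u2⟩ := hpre _ hc2
      exact ⟨pvBkt_lt u1 u2, p, hpL, rfl, hcond⟩
  rw [himg]
  apply Finset.card_image_of_injOn
  intro c hc c' hc' heq
  have h2 := hpre _ (hmemS _ hc)
  have h2' := hpre _ (hmemS _ hc')
  unfold pvBkt at heq
  by_cases ha : c.toNat < 97 <;> by_cases hb : c'.toNat < 97
  · rw [if_pos ha, if_pos hb] at heq; exact pvChar_toNat_inj (by omega)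
  · rw [if_pos ha, if_neg hb] at heq
    exfalso
    have hcc : c'.toNat = c.toNat + 26 := by omega
    have : Char.ofNat (c.toNat + 26) = c' := by rw [← hcc, Char.ofNat_toNat]
    exact hnd c (hmemS _ hc) (by omega) (by omega) (this ▸ hmemS _ hc')
  · rw [if_neg ha, if_pos hb] at heq
    exfalso
    have hcc : c.toNat = c'.toNat + 26 := by omega
    have : Char.ofNat (c'.toNat + 26) = c := by rw [← hcc, Char.ofNat_toNat]
    exact hnd c' (hmemS _ hc') (by omega) (by omega) (this ▸ hmemS _ hc)
  · rw [if_neg ha, if_neg hb] at heq; exact pvChar_toNat_inj (by omega)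

-- ===== B-side lemmas: bitmask machinery =====

-- Int.lor on two natural casts is the Nat-level OR
lemma pvLor_natCast (a b : Nat) : Int.lor (a : Int) (b : Int) = ((a ||| b : Nat) : Int) := rfl

-- reference mask: OR of 2^code over the positions of L satisfying cond, starting from a
def pvMaskOf (cond : Int → Bool) (cs2 : List Char) (L : List Int) (a : Nat) : Nat :=
  L.foldl (fun a p => if cond p then a ||| 2 ^ (pvCh cs2 p).toNat else a) a

lemma pvPopN_eq_countP : ∀ (k n : Nat), n < 2 ^ k →
    pvPopN n = (List.range k).countP (fun b => n.testBit b) := by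
  intro k
  induction k with
  | zero =>
    intro n hn
    interval_cases n
    simp [pvPopN]
  | succ k ih =>
    intro n hn
    by_cases h0 : n = 0
    · subst h0
      rw [pvPopN]
      simp [Nat.zero_testBit]
    · rw [pvPopN, dif_neg h0]
      have hdiv : n / 2 < 2 ^ k := by
        have := Nat.pow_succ 2 k
        omega
      rw [ih _ hdiv, List.range_succ_eq_map, List.countP_cons, List.countP_map]
      have hc : ((fun b => n.testBit b) ∘ Nat.succ) = fun b => (n / 2).testBit b := by
        funext b
        simp [Function.comp, Nat.testBit_add_one]
      rw [hc]
      have hbit : (n.testBit 0 = true) ↔ n % 2 = 1 := by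
        simp [Nat.testBit_zero]
      by_cases hb : n % 2 = 1
      · rw [if_pos (hbit.mpr hb)]; omega
      · rw [if_neg (fun h => hb (hbit.mp h))]; omega

lemma pvMaskOf_testBit (cond : Int → Bool) (cs2 : List Char) (L : List Int) (b : Nat) :
    ∀ a : Nat, (pvMaskOf cond cs2 L a).testBit b
      = (a.testBit b || L.any (fun p => cond p && ((pvCh cs2 p).toNat == b))) := by
  induction L with
  | nil => intro a; simp [pvMaskOf]
  | cons p rest ih =>
    intro a
    simp only [pvMaskOf, List.foldl_cons, List.any_cons]
    by_cases hc : cond p = true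
    · rw [if_pos hc]
      have : rest.foldl (fun a p => if cond p then a ||| 2 ^ (pvCh cs2 p).toNat else a)
          (a ||| 2 ^ (pvCh cs2 p).toNat) = pvMaskOf cond cs2 rest (a ||| 2 ^ (pvCh cs2 p).toNat) := rfl
      rw [this, ih, Nat.testBit_or, Nat.testBit_two_pow]
      by_cases he : (pvCh cs2 p).toNat = b
      · simp [hc, he]
      · have hbe : (((pvCh cs2 p).toNat == b) = false) := beq_eq_false_iff_ne.mpr he
        rw [decide_eq_false he]
        simp [hc, hbe]
    · rw [if_neg hc]
      have : rest.foldl (fun a p => if cond p then a ||| 2 ^ (pvCh cs2 p).toNat else a) a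
          = pvMaskOf cond cs2 rest a := rfl
      rw [this, ih]
      simp only [Bool.not_eq_true] at hc
      simp [hc]

lemma pvMaskOf_lt (cond : Int → Bool) (cs2 : List Char) (L : List Int)
    (h : ∀ p ∈ L, (pvCh cs2 p).toNat ≤ 122) :
    ∀ a : Nat, a < 2 ^ 123 → pvMaskOf cond cs2 L a < 2 ^ 123 := by
  induction L with
  | nil => intro a ha; simpa [pvMaskOf] using ha
  | cons p rest ih =>
    intro a ha
    have hrest : ∀ q ∈ rest, (pvCh cs2 q).toNat ≤ 122 :=
      fun q hq => h q (List.mem_cons_of_mem _ hq)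
    simp only [pvMaskOf, List.foldl_cons]
    by_cases hc : cond p = true
    · rw [if_pos hc]
      exact ih hrest _ (Nat.or_lt_two_pow ha
        (Nat.pow_lt_pow_right (by omega)
          (by have := h p (List.mem_cons_self ..); omega)))
    · rw [if_neg hc]
      exact ih hrest _ ha

-- per-gap value of B: popcount of the mask = number of distinct usable characters
lemma pvPop_eq_card (cond : Int → Bool) (cs2 : List Char)
    (hpre : ∀ c ∈ cs2, 71 ≤ c.toNat ∧ c.toNat ≤ 122) :
    pvPopN (pvMaskOf cond cs2 (PySem.List.pyRange 1 ((cs2.length : Int) + 1) 1) 0)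
      = (pvSat cond cs2 (PySem.List.pyRange 1 ((cs2.length : Int) + 1) 1)).toFinset.card := by
  set L := PySem.List.pyRange 1 ((cs2.length : Int) + 1) 1 with hL
  have hle : ∀ p ∈ L, (pvCh cs2 p).toNat ≤ 122 := fun p hp =>
    (hpre _ (pvMem_of_mem_pyRange cs2 hp)).2
  have hlt : pvMaskOf cond cs2 L 0 < 2 ^ 123 :=
    pvMaskOf_lt cond cs2 L hle 0 (by positivity)
  rw [pvPopN_eq_countP 123 _ hlt]
  rw [List.countP_eq_length_filter]
  rw [← List.toFinset_card_of_nodup (List.Nodup.filter _ List.nodup_range)]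
  have himg : ((List.range 123).filter
      (fun b => (pvMaskOf cond cs2 L 0).testBit b)).toFinset
      = (pvSat cond cs2 L).toFinset.image Char.toNat := by
    ext b
    simp only [List.mem_toFinset, List.mem_filter, List.mem_range, Finset.mem_image,
      pvMaskOf_testBit, Nat.zero_testBit, Bool.false_or,
      List.any_eq_true, Bool.and_eq_true, beq_iff_eq]
    constructor
    · rintro ⟨_, p, hpL, hcond, hcode⟩
      refine ⟨pvCh cs2 p, ?_, hcode⟩
      simp only [List.mem_toFinset, pvSat, List.mem_map]
      exact ⟨p, List.mem_filter.mpr ⟨hpL, hcond⟩, rfl⟩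
    · rintro ⟨c, hcS, rfl⟩
      simp only [List.mem_toFinset, pvSat, List.mem_map, List.mem_filter] at hcS
      obtain ⟨p, ⟨hpL, hcond⟩, rfl⟩ := hcS
      exact ⟨by have := hle p hpL; omega, p, hpL, hcond, rfl⟩
  rw [himg]
  exact Finset.card_image_of_injOn (fun c _ c' _ heq => pvChar_toNat_inj heq)

-- one sweep of the inner gap loop: every entry of the masks list is updated independently
lemma pvSweep (c : Int → Bool) (bit : Int) (M : Nat) (v : Nat → Int) :
    ∀ t : Nat, t ≤ M →
    (((List.range t).map (fun k : Nat => (k : Int))).foldl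
        (fun ms i => if c i then
            PySem.List.pySetD ms i (Int.lor (PySem.List.pyGetD ms i 0) bit) else ms)
        ((List.range M).map (fun j : Nat => v j)))
      = (List.range M).map
          (fun j : Nat => if j < t ∧ c (j : Int) = true then Int.lor (v j) bit else v j) := by
  intro t
  induction t with
  | zero =>
    intro _
    simp
  | succ t ih =>
    intro ht
    rw [List.range_succ, List.map_append, List.foldl_append, ih (by omega)]
    simp only [List.map_cons, List.map_nil, List.foldl_cons, List.foldl_nil]
    have hget : PySem.List.pyGetD ((List.range M).map
        (fun j => if j < t ∧ c (j : Int) = true then Int.lor (v j) bit else v j)) (t : Int) 0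
        = v t := by
      rw [PySem.List.pyGetD_natCast,
        List.getD_eq_getElem _ _ (by simpa using ht)]
      simp
    by_cases hc : c (t : Int) = true
    · rw [if_pos hc, PySem.List.pySetD_natCast, hget]
      apply List.ext_getElem (by simp)
      intro j hj1 hj2
      simp only [List.length_map, List.length_range] at hj2
      simp only [List.getElem_set, List.getElem_map, List.getElem_range]
      by_cases hjt : j = t
      · subst hjt
        rw [if_pos rfl, if_pos ⟨by omega, hc⟩]
      · rw [if_neg (Ne.symm hjt)]
        have hiff : (j < t ∧ c (j : Int) = true) ↔ (j < t + 1 ∧ c (j : Int) = true) := by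
          constructor <;> rintro ⟨h1, h2⟩ <;> exact ⟨by omega, h2⟩
        rw [if_congr hiff rfl rfl]
    · rw [if_neg hc]
      apply List.map_congr_left
      intro j hj
      have hiff : (j < t ∧ c (j : Int) = true) ↔ (j < t + 1 ∧ c (j : Int) = true) := by
        constructor
        · rintro ⟨h1, h2⟩; exact ⟨by omega, h2⟩
        · rintro ⟨h1, h2⟩
          refine ⟨?_, h2⟩
          rcases Nat.lt_succ_iff_lt_or_eq.mp h1 with h | h
          · exact h
          · exact absurd (h ▸ h2) hc
      rw [if_congr hiff rfl rfl]

-- the whole masks loop: entry j of the final list is the reference mask for gap j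
lemma pvMasks (cond2 : Int → Int → Bool) (cs2 : List Char) (M : Nat) :
    ∀ (L : List Int) (w : Nat → Nat),
    (L.foldl (fun ms p =>
        (PySem.List.pyRange 0 ((M : Nat) : Int) 1).foldl
          (fun ms i => if cond2 i p then
              PySem.List.pySetD ms i
                (Int.lor (PySem.List.pyGetD ms i 0) ((2 : Int) ^ (pvCh cs2 p).toNat))
            else ms) ms)
      ((List.range M).map (fun j : Nat => ((w j : Nat) : Int))))
    = (List.range M).map (fun j : Nat => ((pvMaskOf (fun p => cond2 (j : Int) p) cs2 L (w j) : Nat) : Int)) := by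
  intro L
  induction L with
  | nil => intro w; simp [pvMaskOf]
  | cons p rest ih =>
    intro w
    simp only [List.foldl_cons]
    simp only [PySem.List.pyRange_zero_nat] at ih ⊢
    rw [pvSweep (fun i => cond2 i p) ((2 : Int) ^ (pvCh cs2 p).toNat) M
      (fun j : Nat => ((w j : Nat) : Int)) M (le_refl M)]
    have hstep : (List.range M).map
        (fun j : Nat => if j < M ∧ cond2 (j : Int) p = true
          then Int.lor ((w j : Nat) : Int) ((2 : Int) ^ (pvCh cs2 p).toNat)
          else ((w j : Nat) : Int))
        = (List.range M).map (fun j : Nat =>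
            (((if cond2 (j : Int) p then w j ||| 2 ^ (pvCh cs2 p).toNat else w j) : Nat) : Int)) := by
      apply List.map_congr_left
      intro j hj
      rw [List.mem_range] at hj
      by_cases hc : cond2 (j : Int) p = true
      · rw [if_pos ⟨hj, hc⟩, if_pos hc]
        rw [show ((2 : Int) ^ (pvCh cs2 p).toNat) = ((2 ^ (pvCh cs2 p).toNat : Nat) : Int) by
          push_cast; ring]
        exact pvLor_natCast _ _
      · rw [if_neg (fun h => hc h.2), if_neg hc]
    rw [hstep, ih (fun j => if cond2 (j : Int) p then w j ||| 2 ^ (pvCh cs2 p).toNat else w j)]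
    apply List.map_congr_left
    intro j _
    congr 1

-- ===== VERDICT (by name: the statement is the Claim_ definition above) =====
theorem waysToIncreaseLCSBy_spec : Claim_equal_waysToIncreaseLCSBy := by
  intro N1 S1 N2 S2 _ hpre
  unfold Spec_waysToIncreaseLCSBy
  rw [Pre_waysToIncreaseLCSBy, Bool.and_eq_true] at hpre
  have hp : ∀ c ∈ S2.toList, 71 ≤ c.toNat ∧ c.toNat ≤ 122 := by
    intro c hc
    have h := List.all_eq_true.mp hpre.1 c hc
    simp only [Bool.and_eq_true, decide_eq_true_eq] at h
    exact h
  have hd : ∀ c ∈ S2.toList, 71 ≤ c.toNat → c.toNat ≤ 96 →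
      Char.ofNat (c.toNat + 26) ∉ S2.toList := by
    intro c hc h1 h2 hmem
    have h := List.all_eq_true.mp hpre.2 c hc
    simp only [Bool.not_eq_true', List.contains_eq_mem, Bool.and_eq_false_iff,
      decide_eq_false_iff_not, h1, h2] at h
    rcases h with (h | h) | h
    · exact h trivial
    · exact h trivial
    · exact h hmem
  simp only [waysToIncreaseLCSBy, waysToIncreaseLCSBy_alt]
  set cs1 := S1.toList with hcs1
  set cs2 := S2.toList with hcs2
  set lcsl := pvFillL cs1 cs2 with hlcsl
  set lcsr := pvFillR cs1 cs2 with hlcsr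
  set m : Int := (cs1.length : Int) with hm
  set n : Int := (cs2.length : Int) with hn
  set L2 := PySem.List.pyRange 1 (n+1) 1 with hL2
  -- position table characterization (A side)
  have hinr : ∀ p ∈ L2, PySem.Raise.InRange cs2.length (p-1) := by
    intro p hpL
    rw [hL2, PySem.List.mem_pyRange_one] at hpL
    constructor <;> [omega; omega]
  obtain ⟨hplen, hpspec⟩ := pvPos_spec cs2 hp L2
    (List.replicate 26 ([] : List Int)) (by simp) hinr
  set POS := L2.foldl (fun pos i =>
      PySem.List.pySetD pos (((PySem.List.pyGetD cs2 (i-1) ' ').toNat : Int) - 97)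
        (PySem.List.pyGetD pos (((PySem.List.pyGetD cs2 (i-1) ' ').toNat : Int) - 97) [] ++ [i]))
    (List.replicate 26 ([] : List Int)) with hPOS
  have hposC : ∀ C : Int, 0 ≤ C → C < 26 →
      PySem.List.pyGetD POS C [] = L2.filter (fun p => pvBkt (pvCh cs2 p) == C.toNat) := by
    intro C h0 h26
    rw [PySem.List.pyGetD_eq_getElem POS [] h0 (by rw [hplen]; exact_mod_cast h26)]
    rw [← List.getD_eq_getElem POS [] (by rw [hplen]; omega)]
    rw [hpspec C.toNat (by omega)]
    rw [List.getD_eq_getElem?_getD, List.getElem?_replicate, if_pos (by omega : C.toNat < 26)]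
    simp
  -- A's per-gap count
  have hA : ∀ (acc : Int), ∀ i ∈ PySem.List.pyRange 0 (m+1) 1,
      (PySem.List.pyRange 0 26 1).foldl (fun ways C =>
        pvInnerA lcsl lcsr m n i (PySem.List.pyGetD POS C []) ways) acc
      = acc + ((pvSat (pvCond lcsl lcsr m n i) cs2 L2).toFinset.card : Int) := by
    intro acc i _
    rw [PySem.List.foldl_congr_mem _ _
      (fun w C => w + (if (L2.filter (fun p => pvBkt (pvCh cs2 p) == C.toNat)).any
          (pvCond lcsl lcsr m n i) then 1 else 0)) acc
      (by
        intro w C hC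
        rw [PySem.List.mem_pyRange_one] at hC
        rw [hposC C hC.1 hC.2, pvInnerA_eq])]
    rw [PySem.List.foldl_add]
    have h26 : (26 : Int) = ((26 : Nat) : Int) := by norm_num
    rw [h26, PySem.List.pyRange_zero_nat, List.map_map]
    have : ((fun C : Int => if (L2.filter (fun p => pvBkt (pvCh cs2 p) == C.toNat)).any
          (pvCond lcsl lcsr m n i) then (1:Int) else 0) ∘ (fun k : Nat => (k : Int)))
        = fun k : Nat => if (L2.filter (fun p => pvBkt (pvCh cs2 p) == k)).any
          (pvCond lcsl lcsr m n i) then (1:Int) else 0 := by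
      funext k; simp
    rw [this, PySem.List.sum_map_ite_one_zero]
    rw [hL2, hn, pvCount_eq (pvCond lcsl lcsr m n i) cs2 hp hd]
  -- B's masks loop characterized
  set Mn : Nat := cs1.length + 1 with hMn
  have hMcast : m + 1 = ((Mn : Nat) : Int) := by rw [hMn]; push_cast; ring
  have hbase : List.replicate (cs1.length + 1) (0 : Int)
      = (List.range Mn).map (fun j : Nat => (((0 : Nat) : Nat) : Int)) := by
    rw [hMn]; simp [List.map_const']
  have hmasks : (L2.foldl (fun ms p =>
        (PySem.List.pyRange 0 (m+1) 1).foldl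
          (fun ms i => if pvGet2 lcsl i (p-1) + pvGet2 lcsr (i+1) (p+1) == pvGet2 lcsl m n then
              PySem.List.pySetD ms i
                (Int.lor (PySem.List.pyGetD ms i 0) ((2 : Int) ^ (PySem.List.pyGetD cs2 (p-1) ' ').toNat))
            else ms) ms)
      (List.replicate (cs1.length + 1) (0 : Int)))
      = (List.range Mn).map (fun j : Nat =>
          ((pvMaskOf (fun p => pvCond lcsl lcsr m n (j : Int) p) cs2 L2 0 : Nat) : Int)) := by
    rw [hbase, hMcast]
    have := pvMasks (fun i p => pvCond lcsl lcsr m n i p) cs2 Mn L2 (fun _ => 0)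
    simp only [pvCond, pvCh] at this
    exact this
  rw [hmasks]
  -- final pass of B: sum of popcounts
  rw [PySem.List.foldl_add]
  rw [List.map_map]
  -- A: fold of per-gap counts
  rw [PySem.List.foldl_congr_mem _ _
    (fun ways i => ways + ((pvSat (pvCond lcsl lcsr m n i) cs2 L2).toFinset.card : Int)) 0 hA]
  rw [PySem.List.foldl_add, hMcast, PySem.List.pyRange_zero_nat, List.map_map]
  congr 1
  refine congrArg List.sum ?_
  apply List.map_congr_left
  intro j _
  simp only [Function.comp_apply]
  rw [pvPopcount, Int.toNat_natCast]
  rw [show pvMaskOf (fun p => pvCond lcsl lcsr m n (j : Int) p) cs2 L2 0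
      = pvMaskOf (pvCond lcsl lcsr m n (j : Int)) cs2 L2 0 from rfl]
  rw [hL2, hn, pvPop_eq_card (pvCond lcsl lcsr m n (j : Int)) cs2 hp]
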